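-- pv_equiv track=rewrite | github.com/Callein/Acmicpc | silver/1260_DFS&BFS.py | BFS
-- ===== SOURCE A (Python) =====
-- from collections import deque, defaultdict
--
-- def BFS(adj, start):
--     visited = set()
--     queue = deque([start])
--     result = []
--
--     while queue:
--         vertex = queue.popleft()
--         if vertex not in visited:
--             visited.add(vertex)
--             result.append(vertex)
--             for neighbour in sorted(adj[vertex]):
--                 if neighbour not in visited:
--                     queue.append(neighbour)
--
--     return result
-- ===== SOURCE B (Python) =====
-- def BFS(adj, start):
--     visited = {start}
--     frontier = [start]
--     result = []
--
--     while frontier: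
--         next_frontier = []
--         for v in frontier:
--             result.append(v)
--             for neighbour in sorted(adj[v]):
--                 if neighbour not in visited:
--                     visited.add(neighbour)
--                     next_frontier.append(neighbour)
--         frontier = next_frontier
--
--     return result
-- ===== Notes on version B (the rewrite author's own statement) =====
-- stated objective: alternative
-- what changed: Level-synchronous BFS: vertices are marked visited at enqueue time and processed frontier-by-frontier, so each vertex enters the queue at most once, instead of A's lazy-deletion deque that may hold many duplicate entries and re-checks visited at pop time.
-- outside the precondition, e.g. on BFS({1: [], 2: [3]}, 1): A returns [1], B returns [1]
import Mathlib
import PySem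

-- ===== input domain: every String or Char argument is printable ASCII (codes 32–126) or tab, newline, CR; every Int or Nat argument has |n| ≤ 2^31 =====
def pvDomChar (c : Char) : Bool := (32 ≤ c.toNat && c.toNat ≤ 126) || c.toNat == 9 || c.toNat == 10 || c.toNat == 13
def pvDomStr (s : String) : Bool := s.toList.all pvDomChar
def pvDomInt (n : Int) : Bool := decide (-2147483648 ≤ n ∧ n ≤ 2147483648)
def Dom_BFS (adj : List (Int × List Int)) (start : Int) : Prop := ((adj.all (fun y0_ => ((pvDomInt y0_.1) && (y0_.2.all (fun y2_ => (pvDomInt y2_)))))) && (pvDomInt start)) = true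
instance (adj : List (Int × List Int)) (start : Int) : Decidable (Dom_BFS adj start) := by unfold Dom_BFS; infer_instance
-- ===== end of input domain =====

-- B replaces A's lazy-deletion deque BFS (duplicates allowed in the queue, visited checked at
-- pop time) by a level-synchronous BFS marking vertices at enqueue time; same return value.


-- dict indexing adj[v] (first match, as in PySem.Dict)
def pvGet (adj : List (Int × List Int)) (v : Int) : Option (List Int) :=
  PySem.Dict.get? (PySem.Dict.mk adj) v

-- ---- termination helpers, cited by the ports' decreasing_by ----
-- number of elements of `univ` not yet in the visited set
def pvUnseen (univ : List Int) (V : PySem.Set Int) : Nat :=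
  (univ.filter (fun k => !(decide (k ∈ V)))).length

lemma pvUnseen_lt (univ : List Int) (V W : PySem.Set Int) (v : Int)
    (hmono : ∀ x ∈ V, x ∈ W) (hm : v ∈ univ) (hv : v ∉ V) (hw : v ∈ W) :
    pvUnseen univ W < pvUnseen univ V := by
  unfold pvUnseen
  simp only [← List.countP_eq_length_filter]
  induction univ with
  | nil => cases hm
  | cons a t ih =>
    have hle : t.countP (fun k => !(decide (k ∈ W))) ≤ t.countP (fun k => !(decide (k ∈ V))) := by
      refine List.countP_mono_left ?_
      intro x _ hx
      simp only [Bool.not_eq_true', decide_eq_false_iff_not] at hx ⊢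
      exact fun hxV => hx (hmono x hxV)
    rw [List.countP_cons, List.countP_cons]
    rcases List.mem_cons.1 hm with rfl | hmt
    · simp [hv, hw]
      omega
    · have hlt := ih hmt
      by_cases haV : a ∈ V
      · simp [haV, hmono a haV]
        omega
      · by_cases haW : a ∈ W <;> simp [haV, haW] <;> omega

lemma pvGet_mem (adj : List (Int × List Int)) (v : Int) (ns : List Int)
    (h : pvGet adj v = some ns) : (v, ns) ∈ adj := by
  induction adj with
  | nil => simp [pvGet, PySem.Dict.get?] at h
  | cons p t ih =>
    obtain ⟨k, w⟩ := p
    rw [pvGet, PySem.Dict.get?_mk_cons] at h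
    by_cases hk : k = v
    · subst hk
      simp at h
      subst h; exact List.mem_cons_self
    · simp [hk] at h
      exact List.mem_cons_of_mem _ (ih h)

lemma pvGet_key_mem (adj : List (Int × List Int)) (v : Int) (ns : List Int)
    (h : pvGet adj v = some ns) : v ∈ adj.map Prod.fst :=
  List.mem_map.2 ⟨(v, ns), pvGet_mem adj v ns h, rfl⟩

-- ===== PORT A =====
-- while queue: vertex = queue.popleft(); if vertex not in visited: mark, emit, push unvisited sorted neighbours
def bfsLoop (adj : List (Int × List Int)) (visited : PySem.Set Int)
    (queue : List Int) (result : List Int) : List Int :=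
  match queue with
  | [] => result
  | vertex :: rest =>
    if PySem.Set.contains visited vertex then bfsLoop adj visited rest result
    else
      match hg : pvGet adj vertex with
      | none => result  -- Python raises KeyError on adj[vertex]; excluded by Pre_BFS
      | some ns =>
        bfsLoop adj (PySem.Set.add visited vertex)
          (rest ++ (PySem.List.sorted ns (fun x => x) false).filter
              (fun n => !(PySem.Set.contains (PySem.Set.add visited vertex) n)))
          (result ++ [vertex])
termination_by (pvUnseen (adj.map Prod.fst) visited, queue.length)
decreasing_by
  · exact Prod.Lex.right _ (by simp)
  · refine Prod.Lex.left _ _ (pvUnseen_lt _ _ _ vertex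
      (fun x hx => (PySem.Set.mem_add _ _ _).2 (Or.inl hx))
      (pvGet_key_mem adj vertex ns hg)
      (fun hmem => ?_)
      ((PySem.Set.mem_add _ _ _).2 (Or.inr rfl)))
    exact ‹¬ PySem.Set.contains visited vertex = true› ((PySem.Set.contains_iff _ _).2 hmem)

def BFS (adj : List (Int × List Int)) (start : Int) : List Int :=
  bfsLoop adj PySem.Set.empty [start] []

-- ===== PORT B =====
-- if neighbour not in visited: visited.add(neighbour); next_frontier.append(neighbour)
def pvMark (st : PySem.Set Int × List Int) (n : Int) : PySem.Set Int × List Int :=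
  if PySem.Set.contains st.1 n then st else (PySem.Set.add st.1 n, st.2 ++ [n])

-- body of `for v in frontier`: emit v, then mark-and-collect its sorted neighbours
def pvVisit (adj : List (Int × List Int)) (st : PySem.Set Int × List Int × List Int)
    (v : Int) : PySem.Set Int × List Int × List Int :=
  match pvGet adj v with
  | none => (st.1, st.2.1, st.2.2 ++ [v])  -- Python raises KeyError on adj[v]; excluded by Pre_BFS
  | some ns =>
    let m := (PySem.List.sorted ns (fun x => x) false).foldl pvMark (st.1, st.2.1)
    (m.1, m.2, st.2.2 ++ [v])

-- termination facts about the two folds (cited in bfsLevel's decreasing_by)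
lemma pvMark_fold_mono (l : List Int) (p : PySem.Set Int × List Int) (x : Int)
    (h : x ∈ p.1) : x ∈ (l.foldl pvMark p).1 := by
  induction l generalizing p with
  | nil => exact h
  | cons a t ih =>
    simp only [List.foldl_cons]
    apply ih
    unfold pvMark
    split
    · exact h
    · exact (PySem.Set.mem_add _ _ _).2 (Or.inl h)

lemma pvMark_fold_spec (l : List Int) (p : PySem.Set Int × List Int) (x : Int)
    (h : x ∈ (l.foldl pvMark p).2) :
    x ∈ p.2 ∨ (x ∈ l ∧ x ∉ p.1 ∧ x ∈ (l.foldl pvMark p).1) := by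
  induction l generalizing p with
  | nil => exact Or.inl h
  | cons a t ih =>
    simp only [List.foldl_cons] at h ⊢
    rcases ih _ h with h2 | ⟨hxt, hfresh, hfin⟩
    · unfold pvMark at h2
      split at h2
      · exact Or.inl h2
      · rcases List.mem_append.1 h2 with h3 | h3
        · exact Or.inl h3
        · rename_i hna
          simp at h3; subst h3
          refine Or.inr ⟨List.mem_cons_self, fun hmem => hna ((PySem.Set.contains_iff _ _).2 hmem), ?_⟩
          refine pvMark_fold_mono _ _ _ ?_
          simp only [pvMark, hna]
          exact (PySem.Set.mem_add _ _ _).2 (Or.inr rfl)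
    · refine Or.inr ⟨List.mem_cons_of_mem _ hxt, ?_, hfin⟩
      intro hmem
      unfold pvMark at hfresh
      split at hfresh
      · exact hfresh hmem
      · exact hfresh ((PySem.Set.mem_add _ _ _).2 (Or.inl hmem))

lemma pvVisit_fold_mono (adj : List (Int × List Int)) (F : List Int)
    (st : PySem.Set Int × List Int × List Int) (x : Int)
    (h : x ∈ st.1) : x ∈ (F.foldl (pvVisit adj) st).1 := by
  induction F generalizing st with
  | nil => exact h
  | cons v t ih =>
    simp only [List.foldl_cons]
    apply ih
    unfold pvVisit
    split
    · exact h
    · exact pvMark_fold_mono _ _ _ h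

lemma pvVisit_fold_spec (adj : List (Int × List Int)) (F : List Int)
    (st : PySem.Set Int × List Int × List Int) (x : Int)
    (h : x ∈ (F.foldl (pvVisit adj) st).2.1) :
    x ∈ st.2.1 ∨ (x ∈ adj.flatMap Prod.snd ∧ x ∉ st.1 ∧ x ∈ (F.foldl (pvVisit adj) st).1) := by
  induction F generalizing st with
  | nil => exact Or.inl h
  | cons v t ih =>
    simp only [List.foldl_cons] at h ⊢
    rcases ih _ h with h2 | ⟨hxu, hfresh, hfin⟩
    · rw [pvVisit] at h2
      split at h2
      · exact Or.inl h2
      · rename_i ns hg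
        simp only at h2
        rcases pvMark_fold_spec _ _ _ h2 with h3 | ⟨hxs, hfresh, hfin⟩
        · exact Or.inl h3
        · refine Or.inr ⟨?_, hfresh, ?_⟩
          · exact List.mem_flatMap.2 ⟨(v, ns), pvGet_mem adj v ns hg,
              (PySem.List.mem_sorted _ _ _ _).1 hxs⟩
          · refine pvVisit_fold_mono _ _ _ _ ?_
            rw [pvVisit, hg]
            exact hfin
    · refine Or.inr ⟨hxu, ?_, hfin⟩
      intro hmem
      rw [pvVisit] at hfresh
      split at hfresh
      · exact hfresh hmem
      · exact hfresh (pvMark_fold_mono _ _ _ hmem)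

-- while frontier: process every v of frontier, then recurse on the collected next frontier
-- one pass of `for v in frontier` with its accumulated (visited, next_frontier, result)
def pvRound (adj : List (Int × List Int)) (visited : PySem.Set Int)
    (frontier : List Int) (result : List Int) : PySem.Set Int × List Int × List Int :=
  frontier.foldl (pvVisit adj) (visited, ([], result))

lemma pvRound_mono (adj : List (Int × List Int)) (visited : PySem.Set Int)
    (frontier result : List Int) (x : Int) (h : x ∈ visited) :
    x ∈ (pvRound adj visited frontier result).1 :=
  pvVisit_fold_mono adj frontier _ x h

lemma pvRound_spec (adj : List (Int × List Int)) (visited : PySem.Set Int)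
    (frontier result : List Int) (x : Int)
    (h : x ∈ (pvRound adj visited frontier result).2.1) :
    x ∈ adj.flatMap Prod.snd ∧ x ∉ visited ∧ x ∈ (pvRound adj visited frontier result).1 := by
  rcases pvVisit_fold_spec adj frontier (visited, ([], result)) x h with h2 | h2
  · cases h2
  · exact h2

def bfsLevel (adj : List (Int × List Int)) (visited : PySem.Set Int)
    (frontier : List Int) (result : List Int) : List Int :=
  if frontier = [] then result
  else
    let st := pvRound adj visited frontier result
    match hnf : st.2.1 with
    | [] => st.2.2  -- next frontier empty: the while loop exits
    | _ :: _ => bfsLevel adj st.1 st.2.1 st.2.2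
termination_by pvUnseen (adj.flatMap Prod.snd) visited
decreasing_by
  rename_i n t
  obtain ⟨hu, hf, hw⟩ := pvRound_spec adj visited frontier result n
      (by rw [hnf]; exact List.mem_cons_self)
  exact pvUnseen_lt _ _ _ n (fun x hx => pvRound_mono adj visited frontier result x hx) hu hf hw

def BFS_alt (adj : List (Int × List Int)) (start : Int) : List Int :=
  bfsLevel adj (PySem.Set.ofList [start]) [start] []

-- ===== PRECONDITION & SPEC =====
-- Pre_BFS excludes exactly the KeyError risk: it requires start and every listed neighbour to be
-- a key of adj. A (and B) raise KeyError when a REACHABLE vertex is missing from adj;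
-- reachability is not a closed-form condition, so Pre_ also excludes inputs whose only missing
-- neighbours are unreachable, on which A returns normally (and B returns the same value).
def Pre_BFS (adj : List (Int × List Int)) (start : Int) : Prop :=
  start ∈ adj.map Prod.fst ∧ ∀ p ∈ adj, ∀ n ∈ p.2, n ∈ adj.map Prod.fst

instance (adj : List (Int × List Int)) (start : Int) : Decidable (Pre_BFS adj start) := by
  unfold Pre_BFS; infer_instance

def pvWitness_BFS : (List (Int × List Int)) × Int := ([(1, [2]), (2, [1, 1]), (3, [])], 1)

def Spec_BFS (adj : List (Int × List Int)) (start : Int) (out : List Int) : Prop := out = BFS_alt adj start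
instance (adj : List (Int × List Int)) (start : Int) (out : List Int) : Decidable (Spec_BFS adj start out) := by unfold Spec_BFS; infer_instance

-- ===== CLAIM (what is proved, stated in full; the proofs are below) =====
def Claim_equal_BFS : Prop := ∀ (adj : List (Int × List Int)) (start : Int), Dom_BFS adj start → Pre_BFS adj start → Spec_BFS adj start (BFS adj start)

-- ===== LEMMAS AND PROOFS =====

lemma pvGet_isSome_of_mem (adj : List (Int × List Int)) (v : Int)
    (h : v ∈ adj.map Prod.fst) : ∃ ns, pvGet adj v = some ns := by
  induction adj with
  | nil => simp at h
  | cons p t ih =>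
    obtain ⟨k, w⟩ := p
    rw [pvGet, PySem.Dict.get?_mk_cons]
    by_cases hk : k = v
    · exact ⟨w, by simp [hk]⟩
    · simp only [List.map_cons, List.mem_cons] at h
      rcases h with h | h
      · exact absurd h.symm hk
      · obtain ⟨ns, hns⟩ := ih h
        rw [pvGet] at hns
        exact ⟨ns, by simp [hk]; exact hns⟩

-- keep-first dedup (first occurrences, in order)
def dedupF : List Int → List Int
  | [] => []
  | x :: xs => x :: dedupF (xs.filter (fun y => !(y == x)))
termination_by l => l.length
decreasing_by
  have h1 := List.length_filter_le (fun (y : {a // a ∈ xs}) => !(y.1 == x)) xs.attach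
  simp at h1 ⊢
  omega

lemma dedupF_nil : dedupF [] = [] := by rw [dedupF]
lemma dedupF_cons (x : Int) (xs : List Int) :
    dedupF (x :: xs) = x :: dedupF (xs.filter (fun y => !(y == x))) := by rw [dedupF]

lemma mem_dedupF (l : List Int) (x : Int) : x ∈ dedupF l ↔ x ∈ l := by
  generalize hn : l.length = n
  induction n using Nat.strong_induction_on generalizing l with
  | _ n ih =>
    cases l with
    | nil => simp [dedupF_nil]
    | cons a xs =>
      rw [dedupF_cons]
      have hlt : (xs.filter (fun y => !(y == a))).length < n := by
        have := List.length_filter_le (fun y => !(y == a)) xs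
        simp at hn; omega
      by_cases hax : x = a
      · simp [hax]
      · simp only [List.mem_cons, ih _ hlt _ rfl, List.mem_filter, hax, false_or]
        constructor
        · exact fun h => h.1
        · exact fun h => ⟨h, by simp [hax]⟩

lemma dedupF_append (a b : List Int) :
    dedupF (a ++ b) = dedupF a ++ dedupF (b.filter (fun y => !(a.contains y))) := by
  generalize hn : a.length = n
  induction n using Nat.strong_induction_on generalizing a b with
  | _ n ih =>
    cases a with
    | nil => simp [dedupF_nil]
    | cons x xs =>
      have hlt : (xs.filter (fun y => !(y == x))).length < n := by
        have := List.length_filter_le (fun y => !(y == x)) xs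
        simp at hn; omega
      rw [List.cons_append, dedupF_cons, dedupF_cons, List.filter_append,
        ih _ hlt _ _ rfl]
      congr 2
      rw [List.filter_filter]
      have hf : List.filter (fun a => !(List.filter (fun y => !(y == x)) xs).contains a && !(a == x)) b
          = List.filter (fun y => !((x :: xs).contains y)) b := by
        refine List.filter_congr ?_
        intro y _
        by_cases hyx : y = x
        · simp [hyx]
        · simp [hyx, List.mem_filter]
      rw [hf]

-- the vertices newly enqueued when v's sorted neighbour list ns is scanned against visited W
def pvNew (W : PySem.Set Int) (ns : List Int) : List Int :=
  dedupF ((PySem.List.sorted ns (fun x => x) false).filter (fun n => !(PySem.Set.contains W n)))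

lemma pvNew_sub (W : PySem.Set Int) (ns : List Int) (x : Int) (h : x ∈ pvNew W ns) :
    x ∈ ns ∧ x ∉ W := by
  rcases List.mem_filter.1 ((mem_dedupF _ _).1 h) with ⟨h1, h2⟩
  refine ⟨(PySem.List.mem_sorted _ _ _ _).1 h1, fun hmem => ?_⟩
  rw [(PySem.Set.contains_iff W x).2 hmem] at h2
  cases h2

-- proof-side eager BFS: one queue, visited = ever-enqueued
def bfsE (adj : List (Int × List Int)) (W : PySem.Set Int)
    (E : List Int) (R : List Int) : List Int :=
  match E with
  | [] => R
  | v :: es =>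
    match hg : pvGet adj v with
    | none => R
    | some ns =>
      bfsE adj (PySem.Set.update W (pvNew W ns)) (es ++ pvNew W ns) (R ++ [v])
termination_by (pvUnseen (adj.flatMap Prod.snd) W, E.length)
decreasing_by
  cases hnew : pvNew W ns with
  | nil => exact Prod.Lex.right _ (by simp)
  | cons n t =>
    apply Prod.Lex.left
    have hn : n ∈ pvNew W ns := by rw [hnew]; exact List.mem_cons_self
    obtain ⟨h1, h2⟩ := pvNew_sub W ns n hn
    refine pvUnseen_lt _ _ _ n ?_ ?_ h2 ?_
    · intro x hx
      exact (PySem.Set.mem_update _ _ _).2 (Or.inl hx)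
    · exact List.mem_flatMap.2 ⟨(v, ns), pvGet_mem adj v ns hg, h1⟩
    · exact (PySem.Set.mem_update _ _ _).2 (Or.inr List.mem_cons_self)

-- Boolean form of membership in add
lemma pvContains_add (V : PySem.Set Int) (v x : Int) :
    PySem.Set.contains (PySem.Set.add V v) x = (PySem.Set.contains V x || x == v) := by
  rw [Bool.eq_iff_iff]
  simp only [Bool.or_eq_true, beq_iff_eq, PySem.Set.contains_iff, PySem.Set.mem_add]

-- the marking fold over a neighbour list, in closed form
lemma pvMark_fold_eq (l : List Int) (W : PySem.Set Int) (acc : List Int) :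
    l.foldl pvMark (W, acc) =
      (PySem.Set.update W (dedupF (l.filter (fun n => !(PySem.Set.contains W n)))),
        acc ++ dedupF (l.filter (fun n => !(PySem.Set.contains W n)))) := by
  induction l generalizing W acc with
  | nil => simp [dedupF_nil, PySem.Set.update]
  | cons n t ih =>
    rw [List.foldl_cons, List.filter_cons]
    cases hc : PySem.Set.contains W n with
    | true =>
      rw [show pvMark (W, acc) n = (W, acc) from by unfold pvMark; rw [if_pos hc], ih]
      simp
    | false =>
      have hfil : (t.filter (fun y => !(PySem.Set.contains W y))).filter (fun y => !(y == n))
          = t.filter (fun y => !(PySem.Set.contains (PySem.Set.add W n) y)) := by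
        rw [List.filter_filter]
        refine List.filter_congr ?_
        intro y _
        rw [pvContains_add]
        cases hy : PySem.Set.contains W y <;> cases hyn : y == n <;> simp
      rw [show pvMark (W, acc) n = (PySem.Set.add W n, acc ++ [n]) from by
          unfold pvMark; rw [if_neg (by rw [hc]; exact Bool.false_ne_true)], ih]
      simp only [Bool.not_false, reduceIte, dedupF_cons, hfil, PySem.Set.update_cons]
      simp

-- one visited vertex, in closed form
lemma pvVisit_eq (adj : List (Int × List Int)) (st : PySem.Set Int × List Int × List Int)
    (v : Int) (ns : List Int) (hg : pvGet adj v = some ns) :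
    pvVisit adj st v =
      (PySem.Set.update st.1 (pvNew st.1 ns), st.2.1 ++ pvNew st.1 ns, st.2.2 ++ [v]) := by
  rw [pvVisit, hg]
  simp only [pvMark_fold_eq, pvNew]

lemma bfsE_nil (adj : List (Int × List Int)) (W : PySem.Set Int) (R : List Int) :
    bfsE adj W [] R = R := by rw [bfsE]

lemma bfsE_cons_some (adj : List (Int × List Int)) (W : PySem.Set Int)
    (v : Int) (es R ns : List Int) (hg : pvGet adj v = some ns) :
    bfsE adj W (v :: es) R =
      bfsE adj (PySem.Set.update W (pvNew W ns)) (es ++ pvNew W ns) (R ++ [v]) := by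
  rw [bfsE, hg]

-- eager processing of a frontier prefix is one round of the level loop
lemma eager_fold (adj : List (Int × List Int)) :
    ∀ (F : List Int) (W : PySem.Set Int) (NF R : List Int),
      (∀ x ∈ F, x ∈ adj.map Prod.fst) →
      bfsE adj W (F ++ NF) R =
        bfsE adj (F.foldl (pvVisit adj) (W, NF, R)).1
          (F.foldl (pvVisit adj) (W, NF, R)).2.1 (F.foldl (pvVisit adj) (W, NF, R)).2.2 := by
  intro F
  induction F with
  | nil => intro W NF R _; simp
  | cons v fs ih =>
    intro W NF R hF
    obtain ⟨ns, hg⟩ := pvGet_isSome_of_mem adj v (hF v List.mem_cons_self)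
    rw [List.cons_append, bfsE_cons_some adj W v (fs ++ NF) R ns hg]
    rw [List.append_assoc, ih _ _ _ (fun x hx => hF x (List.mem_cons_of_mem _ hx)),
      List.foldl_cons, pvVisit_eq adj _ v ns hg]

-- the level loop equals the eager loop
lemma level_eq_eager (adj : List (Int × List Int)) (W : PySem.Set Int) (F R : List Int) :
    (∀ p ∈ adj, ∀ n ∈ p.2, n ∈ adj.map Prod.fst) →
    (∀ x ∈ F, x ∈ adj.map Prod.fst) →
    bfsLevel adj W F R = bfsE adj W F R := by
  fun_induction bfsLevel adj W F R with
  | case1 W R =>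
    intro _ _
    rw [bfsE_nil]
  | case2 W F R hne st hnf =>
    intro hcl hF
    have he := eager_fold adj F W [] R hF
    rw [List.append_nil] at he
    rw [he]
    rw [show (F.foldl (pvVisit adj) (W, ([], R))) = st from rfl, hnf, bfsE_nil]
  | case3 W F R hne st n t hnf ih =>
    intro hcl hF
    have hF' : ∀ x ∈ st.2.1, x ∈ adj.map Prod.fst := by
      intro x hx
      obtain ⟨hu, -, -⟩ := pvRound_spec adj W F R x hx
      obtain ⟨p, hp, hxp⟩ := List.mem_flatMap.1 hu
      exact hcl p hp x hxp
    have he := eager_fold adj F W [] R hF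
    rw [List.append_nil] at he
    rw [he]
    rw [show (F.foldl (pvVisit adj) (W, ([], R))) = st from rfl]
    exact ih hcl hF'

-- the lazy-deletion loop equals the eager loop
lemma sim (adj : List (Int × List Int)) (V : PySem.Set Int) (Q R : List Int) :
    ∀ (W : PySem.Set Int) (E : List Int),
      (∀ p ∈ adj, ∀ n ∈ p.2, n ∈ adj.map Prod.fst) →
      E = dedupF (Q.filter (fun x => !(PySem.Set.contains V x))) →
      (∀ x, x ∈ W ↔ (x ∈ V ∨ x ∈ E)) →
      (∀ x ∈ Q, x ∈ adj.map Prod.fst) →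
      bfsLoop adj V Q R = bfsE adj W E R := by
  fun_induction bfsLoop adj V Q R with
  | case1 V R =>
    intro W E hcl hE hW hQ
    simp only [List.filter_nil, dedupF_nil] at hE
    subst hE
    rw [bfsE_nil]
  | case2 V R v qs hvis ih =>
    intro W E hcl hE hW hQ
    refine ih W E hcl ?_ hW (fun x hx => hQ x (List.mem_cons_of_mem _ hx))
    rw [List.filter_cons, hvis] at hE
    simpa using hE
  | case3 V R v qs hvis hg =>
    intro W E hcl hE hW hQ
    obtain ⟨ns, hg'⟩ := pvGet_isSome_of_mem adj v (hQ v List.mem_cons_self)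
    rw [hg] at hg'
    cases hg'
  | case4 V R v qs hvis ns hg ih =>
    intro W E hcl hE hW hQ
    have hvisF : PySem.Set.contains V v = false := by
      cases h : PySem.Set.contains V v
      · rfl
      · exact absurd h hvis
    -- decompose E = v :: E'
    have hfilv : (qs.filter (fun x => !(PySem.Set.contains V x))).filter (fun y => !(y == v))
        = qs.filter (fun x => !(PySem.Set.contains (PySem.Set.add V v) x)) := by
      rw [List.filter_filter]
      refine List.filter_congr ?_
      intro y _
      rw [pvContains_add]
      cases hy : PySem.Set.contains V y <;> cases hyn : y == v <;> simp
    have hEv : E = v :: dedupF (qs.filter (fun x => !(PySem.Set.contains (PySem.Set.add V v) x))) := by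
      rw [hE, List.filter_cons, hvisF]
      simp only [Bool.not_false, if_true]
      rw [dedupF_cons, hfilv]
    set V' := PySem.Set.add V v with hV'
    set E' := dedupF (qs.filter (fun x => !(PySem.Set.contains V' x))) with hE'
    subst hEv
    rw [bfsE_cons_some adj W v E' R ns hg]
    refine ih (PySem.Set.update W (pvNew W ns)) (E' ++ pvNew W ns) hcl ?_ ?_ ?_
    · -- queue invariant
      rw [List.filter_append, List.filter_filter]
      have hfil2 : (PySem.List.sorted ns (fun x => x) false).filter
            (fun a => !(PySem.Set.contains V' a) && !(PySem.Set.contains V' a))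
          = (PySem.List.sorted ns (fun x => x) false).filter (fun a => !(PySem.Set.contains V' a)) := by
        refine List.filter_congr ?_
        intro y _
        cases hy : PySem.Set.contains V' y <;> simp
      rw [hfil2, dedupF_append, hE']
      congr 1
      rw [List.filter_filter, pvNew]
      congr 1
      have hE'mem : ∀ y : Int, y ∈ E' ↔ (y ∈ qs ∧ y ∉ V') := by
        intro y
        rw [hE', mem_dedupF, List.mem_filter]
        simp
      have hV'mem : ∀ y : Int, y ∈ V' ↔ (y ∈ V ∨ y = v) := by
        intro y
        rw [hV']
        exact PySem.Set.mem_add V v y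
      have hA : ∀ y : Int, (List.filter (fun x => !(PySem.Set.contains V' x)) qs).contains y = true
          ↔ (y ∈ qs ∧ y ∉ V') := by
        intro y
        rw [List.contains_iff_mem, List.mem_filter]
        simp
      refine List.filter_congr ?_
      intro y _
      rw [← Bool.not_or]
      have hmain : ((List.filter (fun x => !(PySem.Set.contains V' x)) qs).contains y
          || PySem.Set.contains V' y) = PySem.Set.contains W y := by
        rw [Bool.eq_iff_iff, Bool.or_eq_true, hA y, PySem.Set.contains_iff,
          PySem.Set.contains_iff, hW y, List.mem_cons, hE'mem y, hV'mem y]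
        tauto
      rw [hmain]
    · -- visited invariant
      intro x
      rw [PySem.Set.mem_update, List.mem_append]
      have h1 := hW x
      rw [List.mem_cons] at h1
      rw [h1, hV', PySem.Set.mem_add]
      tauto
    · -- queue keys
      intro x hx
      rcases List.mem_append.1 hx with h | h
      · exact hQ x (List.mem_cons_of_mem _ h)
      · have := List.mem_filter.1 h
        exact hcl (v, ns) (pvGet_mem adj v ns hg)
          x ((PySem.List.mem_sorted _ _ _ _).1 this.1)

-- ===== VERDICT (by name: the statement is the Claim_ definition above) =====
theorem BFS_spec : Claim_equal_BFS := by
  intro adj start _ hpre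
  unfold Spec_BFS BFS BFS_alt
  rw [sim adj PySem.Set.empty [start] [] (PySem.Set.ofList [start]) [start] hpre.2
      (by simp [PySem.Set.empty, dedupF_cons, dedupF_nil])
      (by intro x; simp [PySem.Set.ofList, PySem.Set.empty, PySem.Set.add, PySem.Set.contains])
      (by intro x hx; simp at hx; subst hx; exact hpre.1),
    level_eq_eager adj (PySem.Set.ofList [start]) [start] [] hpre.2
      (by intro x hx; simp at hx; subst hx; exact hpre.1)]
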